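-- pv_equiv track=rewrite | github.com/BrianLusina/PythonSnips | pysnips/data_structures/lists/data_reverse/__init__.py | data_reverse
-- ===== SOURCE A (Python) =====
-- def data_reverse(data):
--     """
--     Picks the stream of data and converts it into bits, then reverses the input
--     :param data:
--     :return:
--     """
--     # byte store
--     byte_store = []
--     reversed_bytes = []
--
--     # length of 8/16/32/64/ multiple of 8
--     data_len = len(data)
--
--     count = 0
--     while count < data_len:
--         byte_store.append(data[count: count + 8])
--         count += 8
--
--     for byte in reversed(byte_store):
--         reversed_bytes += byte
--     return reversed_bytes
-- ===== SOURCE B (Python) =====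
-- def data_reverse(data):
--     # Double-reversal: reverse the whole stream once, then un-reverse each
--     # segment while scanning forward.  After the global reversal the chunks
--     # appear in the desired (reversed) order but each is internally reversed;
--     # the first segment has length len % 8 (or 8), the rest have length 8.
--     rev = list(data)[::-1]
--     m = len(rev) % 8 or 8
--     out = rev[:m][::-1]
--     for i in range(m, len(rev), 8):
--         out += rev[i:i + 8][::-1]
--     return out
-- ===== Notes on version B (the rewrite author's own statement) =====
-- stated objective: alternative
-- what changed: Replaces A's chunk-collection scheme (forward while loop appending 8-element slices to a chunk list, then a second reversed pass concatenating them) with the double-reversal algorithm: reverse the whole stream once, then un-reverse each segment (first of length len%8 or 8, then 8s) in a single forward scan, so no chunk list and no reversed iteration.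
import Mathlib
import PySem

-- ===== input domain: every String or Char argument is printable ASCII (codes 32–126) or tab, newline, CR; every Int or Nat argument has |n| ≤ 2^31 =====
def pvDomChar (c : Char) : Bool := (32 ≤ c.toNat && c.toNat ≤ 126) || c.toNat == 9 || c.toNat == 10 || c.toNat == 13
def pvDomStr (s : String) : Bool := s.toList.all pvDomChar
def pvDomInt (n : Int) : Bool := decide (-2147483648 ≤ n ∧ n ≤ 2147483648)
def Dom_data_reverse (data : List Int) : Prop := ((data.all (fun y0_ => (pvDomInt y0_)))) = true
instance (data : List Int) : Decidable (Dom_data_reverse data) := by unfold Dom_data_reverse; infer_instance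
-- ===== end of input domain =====

-- B replaces A's collect-chunks-then-reversed-concatenate scheme with the double-reversal
-- algorithm (reverse the whole stream once, then un-reverse each segment in one forward
-- scan) — an alternative algorithm of the same O(n) cost.

-- ===== PORT A =====
-- the while loop: append data[count:count+8] to byte_store and advance count by 8 while count < data_len
def pvByteStore (data : List Int) (dataLen : Int) (count : Int) : List (List Int) :=
  if _h : count < dataLen then
    PySem.List.slice data (some count) (some (count + 8)) :: pvByteStore data dataLen (count + 8)
  else []
termination_by (dataLen - count).toNat
decreasing_by omega

def data_reverse (data : List Int) : List Int :=
  ((pvByteStore data (data.length : Int) 0).reverse).foldl (fun acc byte => acc ++ byte) []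

-- ===== PORT B =====
-- rev = list(data)[::-1]; m = len(rev) % 8 or 8; out = rev[:m][::-1];
-- for i in range(m, len(rev), 8): out += rev[i:i+8][::-1]
-- ([::-1] is List.reverse: PySem.List.slice?_none_none_neg_one)
def data_reverse_alt (data : List Int) : List Int :=
  let rev := data.reverse
  let m : Int :=                                           -- len(rev) % 8 or 8
    if PySem.Int.mod (rev.length : Int) 8 = 0 then 8 else PySem.Int.mod (rev.length : Int) 8
  let out := (PySem.List.slice rev none (some m)).reverse  -- rev[:m][::-1]
  (PySem.List.pyRange m (rev.length : Int) 8).foldl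
    (fun out i => out ++ (PySem.List.slice rev (some i) (some (i + 8))).reverse) out

-- ===== PRECONDITION & SPEC =====
def Spec_data_reverse (data : List Int) (out : List Int) : Prop := out = data_reverse_alt data
instance (data : List Int) (out : List Int) : Decidable (Spec_data_reverse data out) := by unfold Spec_data_reverse; infer_instance

-- ===== CLAIM (what is proved, stated in full; the proofs are below) =====
def Claim_equal_data_reverse : Prop := ∀ (data : List Int), Dom_data_reverse data → Spec_data_reverse data (data_reverse data)

-- ===== LEMMAS AND PROOFS =====

-- common reference value: the chunks of data, concatenated last chunk first
def pvRev (data : List Int) : List Int :=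
  if _h : data = [] then []
  else pvRev (data.drop 8) ++ data.take 8
termination_by data.length
decreasing_by
  have := List.length_pos_of_ne_nil _h
  simp; omega

theorem pvRev_nil : pvRev [] = [] := by
  unfold pvRev; simp

theorem pvRev_cons (data : List Int) (h : data ≠ []) :
    pvRev data = pvRev (data.drop 8) ++ data.take 8 := by
  rw [pvRev]; simp [h]

theorem pvRev_small (data : List Int) (h : data.length ≤ 8) : pvRev data = data := by
  by_cases hE : data = []
  · simp [hE, pvRev_nil]
  · rw [pvRev_cons data hE, List.drop_eq_nil_iff.mpr (by omega),
      List.take_of_length_le (by omega), pvRev_nil, List.nil_append]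

theorem pvRev_snoc (q : Nat) (l t : List Int) (hl : l.length = 8 * q) (ht : t.length ≤ 8) :
    pvRev (l ++ t) = t ++ pvRev l := by
  induction q generalizing l with
  | zero =>
    have : l = [] := List.eq_nil_of_length_eq_zero (by omega)
    simp [this, pvRev_nil, pvRev_small t ht]
  | succ q ih =>
    have hlne : l ≠ [] := by intro h; simp [h] at hl
    have hne : l ++ t ≠ [] := by simp [hlne]
    rw [pvRev_cons _ hne, List.drop_append_of_le_length (by omega),
      List.take_append_of_le_length (by omega),
      ih (l.drop 8) (by simp; omega), List.append_assoc,
      ← pvRev_cons l hlne]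

-- A's byte store at counter c, concatenated back-to-front, is pvRev of data.drop c
theorem byteStore_foldl (data : List Int) (c : Nat) :
    ((pvByteStore data (data.length : Int) (c : Int)).reverse).foldl
      (fun acc byte => acc ++ byte) [] = pvRev (data.drop c) := by
  rw [pvByteStore]
  by_cases h : c < data.length
  · have hlt : (c : Int) < (data.length : Int) := by exact_mod_cast h
    have hslice : PySem.List.slice data (some (c : Int)) (some ((c : Int) + 8)) =
        (data.drop c).take 8 := by
      exact_mod_cast PySem.List.slice_natCast_add (xs := data) (j := c) (n := 8)
    have hrec : ((pvByteStore data (data.length : Int) ((c : Int) + 8)).reverse).foldl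
        (fun acc byte => acc ++ byte) [] = pvRev (data.drop (c + 8)) := by
      have := byteStore_foldl data (c + 8)
      simpa [Nat.cast_add] using this
    have hne : data.drop c ≠ [] := by
      intro hE; have := List.drop_eq_nil_iff.mp hE; omega
    simp only [hlt, dif_pos, hslice, List.reverse_cons, List.foldl_append, List.foldl_cons,
      List.foldl_nil, hrec]
    rw [pvRev_cons _ hne, List.drop_drop]
  · have hge : ¬ ((c : Int) < (data.length : Int)) := by exact_mod_cast h
    have hnil : data.drop c = [] := List.drop_eq_nil_iff.mpr (by omega)
    simp [hge, hnil, pvRev_nil]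
termination_by data.length - c
decreasing_by omega

-- the ascending chunk-start range of B, peeled at the top
theorem pyRange8_snoc (M j : Nat) :
    PySem.List.pyRange (M : Int) ((M : Int) + 8 * ((j : Int) + 1)) 8 =
      PySem.List.pyRange (M : Int) ((M : Int) + 8 * (j : Int)) 8 ++ [(M : Int) + 8 * (j : Int)] := by
  rw [PySem.List.pyRange_of_pos _ _ (by norm_num), PySem.List.pyRange_of_pos _ _ (by norm_num)]
  have h1 : (((M : Int) + 8 * ((j : Int) + 1) - (M : Int) + 8 - 1) / 8).toNat = j + 1 := by omega
  by_cases hj : j = 0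
  · subst hj
    rw [if_pos (by omega), if_neg (by omega), h1]
    simp
  · have h2 : (((M : Int) + 8 * (j : Int) - (M : Int) + 8 - 1) / 8).toNat = j := by omega
    rw [if_pos (by omega), if_pos (by omega), h1, h2, List.range_succ, List.map_append]
    simp

-- B's forward scan from segment start M over j full 8-segments of rev = data.reverse
-- un-reverses, in order, the last j full 8-chunks of data before position n - M
theorem asc (j : Nat) (data acc : List Int) (M : Nat)
    (hge : M + 8 * j ≤ data.length) :
    (PySem.List.pyRange (M : Int) ((M : Int) + 8 * (j : Int)) 8).foldl
      (fun out i => out ++ (PySem.List.slice data.reverse (some i) (some (i + 8))).reverse) acc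
    = acc ++ pvRev ((data.drop (data.length - M - 8 * j)).take (8 * j)) := by
  induction j generalizing acc with
  | zero =>
    have h0 : PySem.List.pyRange (M : Int) ((M : Int) + 8 * ((0 : Nat) : Int)) 8 = [] := by
      rw [PySem.List.pyRange_of_pos _ _ (by norm_num), if_neg (by omega)]
      simp
    rw [h0]
    simp [pvRev_nil]
  | succ j ih =>
    have hcast : ((j + 1 : Nat) : Int) = (j : Int) + 1 := by push_cast; ring
    rw [hcast, pyRange8_snoc M j, List.foldl_append, ih _ (by omega), List.foldl_cons,
      List.foldl_nil]
    have hslice : PySem.List.slice data.reverse (some ((M : Int) + 8 * (j : Int)))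
        (some ((M : Int) + 8 * (j : Int) + 8)) =
        ((data.drop (data.length - M - 8 * j - 8)).take 8).reverse := by
      have he : ((M : Int) + 8 * (j : Int) + 8) = (((M + 8 * j + 8 : Nat)) : Int) := by push_cast; ring
      have he2 : ((M : Int) + 8 * (j : Int)) = (((M + 8 * j : Nat)) : Int) := by push_cast; ring
      rw [he, he2, PySem.List.slice_natCast]
      have h8 : M + 8 * j + 8 - (M + 8 * j) = 8 := by omega
      rw [h8, List.drop_reverse, List.take_reverse]
      congr 1
      have h1 : (data.take (data.length - (M + 8 * j))).length = data.length - (M + 8 * j) := by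
        rw [List.length_take]; omega
      rw [h1, List.drop_take]
      congr 1
      · omega
      · congr 1
        omega
    rw [hslice, List.reverse_reverse]
    set C := (data.drop (data.length - M - 8 * j - 8)).take 8 with hC
    set S := (data.drop (data.length - M - 8 * j)).take (8 * j) with hS
    have hlen8 : C.length = 8 := by
      rw [hC, List.length_take, List.length_drop]
      omega
    have hchunk : (data.drop (data.length - M - 8 * (j + 1))).take (8 * (j + 1)) = C ++ S := by
      have hd : data.length - M - 8 * (j + 1) = data.length - M - 8 * j - 8 := by omega
      rw [hd, show 8 * (j + 1) = 8 + 8 * j by ring, List.take_add, hC, hS]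
      congr 1
      rw [List.drop_drop]
      congr 2
      omega
    have hrw : pvRev (C ++ S) = pvRev S ++ C := by
      have hCne : C ≠ [] := by intro h; rw [h] at hlen8; simp at hlen8
      rw [pvRev_cons _ (by simp [hCne]), List.drop_append_of_le_length (by omega),
        List.drop_of_length_le (by omega), List.nil_append,
        List.take_append_of_le_length (by omega), List.take_of_length_le (by omega)]
    rw [hchunk, hrw, List.append_assoc]

theorem alt_eq_pvRev (data : List Int) : data_reverse_alt data = pvRev data := by
  by_cases hE : data = []
  · subst hE; rw [pvRev_nil]; decide
  · have hpos : 1 ≤ data.length := List.length_pos_of_ne_nil hE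
    set n := data.length with hn
    -- the Python value of m, as a Nat
    set M : Nat := if n % 8 = 0 then 8 else n % 8 with hM
    have hM1 : 1 ≤ M := by rw [hM]; split <;> omega
    have hM8 : M ≤ 8 := by rw [hM]; split <;> omega
    have hMmod : (n - M) % 8 = 0 := by rw [hM]; split <;> omega
    have hMle : M ≤ n := by rw [hM]; split <;> omega
    obtain ⟨q, hq⟩ : ∃ q, n - M = 8 * q := ⟨(n - M) / 8, by omega⟩
    have hmod : PySem.Int.mod ((n : Nat) : Int) 8 = ((n % 8 : Nat) : Int) :=
      PySem.Int.mod_natCast n 8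
    have hmInt : (if PySem.Int.mod ((n : Nat) : Int) 8 = 0 then (8 : Int)
        else PySem.Int.mod ((n : Nat) : Int) 8) = (M : Int) := by
      rw [hmod, hM]
      by_cases h0 : n % 8 = 0
      · rw [if_pos (by exact_mod_cast congrArg (Nat.cast (R := Int)) h0), if_pos h0]; norm_num
      · rw [if_neg (by exact_mod_cast fun h => h0 (by exact_mod_cast h)), if_neg h0]
    unfold data_reverse_alt
    simp only [List.length_reverse, ← hn, hmInt]
    have hout0 : (PySem.List.slice data.reverse none (some (M : Int))).reverse =
        data.drop (n - M) := by
      rw [PySem.List.slice_to_natCast, List.take_reverse, List.reverse_reverse, ← hn]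
    have hend : (n : Int) = (M : Int) + 8 * ((q : Int)) := by omega
    rw [hout0, hend, asc q data _ M (by omega)]
    have h0 : n - M - 8 * q = 0 := by omega
    rw [h0, List.drop_zero]
    have hsplit := List.take_append_drop (8 * q) data
    calc data.drop (n - M) ++ pvRev (data.take (8 * q))
        = pvRev (data.take (8 * q) ++ data.drop (8 * q)) := by
          rw [pvRev_snoc q _ _ (by rw [List.length_take]; omega)
            (by rw [List.length_drop]; omega)]
          congr 1
          rw [hq]
      _ = pvRev data := by rw [hsplit]

-- ===== VERDICT (by name: the statement is the Claim_ definition above) =====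
theorem data_reverse_spec : Claim_equal_data_reverse := by
  intro data _
  unfold Spec_data_reverse data_reverse
  rw [alt_eq_pvRev]
  simpa using byteStore_foldl data 0
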